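-- pv_equiv track=rewrite | github.com/DCMLab/consonance | consonance/consonance.py | get_octave_intervals
-- ===== SOURCE A (Python) =====
-- from itertools import combinations
--
-- def get_octave_intervals(pitches):
--     """Calculate all pairwise intervals, constrained to one octave."""
--     raw_intervals = [p2 - p1 for p1, p2 in combinations(pitches, 2)]
--     oct_intervals = [ivl % 12 for ivl in raw_intervals]
--     for i, ivl in enumerate(oct_intervals):
--         if ivl == 0:
--             oct_intervals[i] = 12
--     oct_intervals.sort()
--     return oct_intervals
-- ===== SOURCE B (Python) =====
-- def get_octave_intervals(pitches):
--     """Calculate all pairwise intervals, constrained to one octave."""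
--     counts = {}
--     for i, p1 in enumerate(pitches):
--         for p2 in pitches[i + 1:]:
--             r = (p2 - p1) % 12
--             counts[r] = counts.get(r, 0) + 1
--     out = []
--     for v in range(1, 12):
--         out += [v] * counts.get(v, 0)
--     return out + [12] * counts.get(0, 0)
-- ===== Notes on version B (the rewrite author's own statement) =====
-- stated objective: faster
-- what changed: Replaces the build-all-intervals-then-comparison-sort pipeline by a single nested pass that tallies the 12 possible interval classes in a dict and emits the sorted result directly by counting sort over the values 1..12.
import Mathlib
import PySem

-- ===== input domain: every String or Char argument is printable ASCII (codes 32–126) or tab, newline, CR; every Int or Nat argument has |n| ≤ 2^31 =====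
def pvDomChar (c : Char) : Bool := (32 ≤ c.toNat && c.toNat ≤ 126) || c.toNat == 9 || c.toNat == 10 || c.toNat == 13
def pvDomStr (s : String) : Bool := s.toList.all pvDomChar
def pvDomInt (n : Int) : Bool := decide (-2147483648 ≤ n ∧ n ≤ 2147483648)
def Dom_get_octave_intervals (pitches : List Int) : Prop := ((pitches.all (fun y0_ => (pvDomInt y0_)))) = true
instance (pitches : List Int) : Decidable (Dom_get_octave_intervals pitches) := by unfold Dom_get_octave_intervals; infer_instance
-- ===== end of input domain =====

-- B replaces build-all-intervals-then-comparison-sort by a dict tally of the 12 interval classes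
-- followed by a counting sort over the values 1..12.

-- ===== PORT A =====
-- tuple unpacking 'p1, p2' of a 2-combination (the default is unreachable: members of combinations _ 2 have length 2)
def pvUnpack2 (c : List Int) : Int :=
  match c with
  | p1 :: p2 :: _ => p2 - p1
  | _ => 0

def get_octave_intervals (pitches : List Int) : List Int :=
  let raw := (PySem.List.combinations pitches 2).map pvUnpack2
  let oct := raw.map (fun ivl => PySem.Int.mod ivl 12)
  let oct2 := oct.map (fun v => if v == 0 then (12 : Int) else v)
  PySem.List.sorted oct2 (fun x => x) false

-- ===== PORT B =====
def get_octave_intervals_alt (pitches : List Int) : List Int :=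
  let counts : PySem.Dict Int Int :=
    (PySem.List.enumerate pitches).foldl
      (fun d ip =>
        (PySem.List.slice pitches (some (ip.1 + 1)) none).foldl
          (fun d p2 =>
            let r := PySem.Int.mod (p2 - ip.2) 12
            d.insert r (d.getD r 0 + 1)) d)
      PySem.Dict.empty
  let out := (PySem.List.pyRange 1 12 1).foldl
    (fun out v => out ++ List.replicate (counts.getD v 0).toNat v) []
  out ++ List.replicate (counts.getD 0 0).toNat 12

-- ===== PRECONDITION & SPEC =====
def Spec_get_octave_intervals (pitches : List Int) (out : List Int) : Prop := out = get_octave_intervals_alt pitches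
instance (pitches : List Int) (out : List Int) : Decidable (Spec_get_octave_intervals pitches out) := by unfold Spec_get_octave_intervals; infer_instance

-- ===== CLAIM (what is proved, stated in full; the proofs are below) =====
def Claim_equal_get_octave_intervals : Prop := ∀ (pitches : List Int), Dom_get_octave_intervals pitches → Spec_get_octave_intervals pitches (get_octave_intervals pitches)

-- ===== LEMMAS AND PROOFS =====

-- the ordered i<j pairs both programs traverse
def pvPairs (xs : List Int) : List (Int × Int) :=
  match xs with
  | [] => []
  | x :: t => t.map (fun y => (x, y)) ++ pvPairs t

theorem pvCombos_eq (xs : List Int) :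
    (PySem.List.combinations xs 2).map pvUnpack2 = (pvPairs xs).map (fun pr => pr.2 - pr.1) := by
  induction xs with
  | nil => simp [PySem.List.combinations_nil_succ, pvPairs]
  | cons x t ih =>
    rw [show (2:Nat) = 1 + 1 from rfl] at *
    rw [PySem.List.combinations_cons_succ, PySem.List.combinations_one]
    simp only [List.map_append, List.map_map, pvPairs, ih]
    simp [pvUnpack2, Function.comp]

theorem pvEnumerate_fst_nonneg {α : Type} (xs : List α) (s : Int) (ip : Int × α)
    (h : ip ∈ PySem.List.enumerate xs s) : s ≤ ip.1 := by
  induction xs generalizing s with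
  | nil => simp [PySem.List.enumerate_nil] at h
  | cons x t ih =>
    rw [PySem.List.enumerate_cons] at h
    rcases List.mem_cons.mp h with h | h
    · simp [h]
    · have := ih (s+1) h; omega

theorem pvEnumerate_shift {α : Type} (xs : List α) (s : Int) :
    PySem.List.enumerate xs (s + 1) = (PySem.List.enumerate xs s).map (fun ip => (ip.1 + 1, ip.2)) := by
  induction xs generalizing s with
  | nil => simp [PySem.List.enumerate_nil]
  | cons x t ih => rw [PySem.List.enumerate_cons, PySem.List.enumerate_cons, List.map_cons, ih (s+1)]

theorem pvNested_eq (xs : List Int) {β : Type} (step : β → Int × Int → β) (d : β) :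
    (PySem.List.enumerate xs 0).foldl
      (fun d ip => (xs.drop (ip.1 + 1).toNat).foldl (fun d p2 => step d (ip.2, p2)) d) d
    = (pvPairs xs).foldl step d := by
  induction xs generalizing d with
  | nil => simp [PySem.List.enumerate_nil, pvPairs]
  | cons x t ih =>
    rw [PySem.List.enumerate_cons, List.foldl_cons]
    have hsh : PySem.List.enumerate t 1 = (PySem.List.enumerate t 0).map (fun ip => (ip.1 + 1, ip.2)) := by
      have := pvEnumerate_shift t 0; norm_num at this; exact this
    simp only [zero_add] 
    rw [hsh]
    rw [List.foldl_map]
    have hcong : ∀ (d : β) (ip : Int × Int), ip ∈ PySem.List.enumerate t 0 →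
        (fun d (ip : Int × Int) => ((x :: t).drop ((ip.1 + 1, ip.2).1 + 1).toNat).foldl
          (fun d p2 => step d ((ip.1 + 1, ip.2).2, p2)) d) d ip
        = (fun d (ip : Int × Int) => (t.drop (ip.1 + 1).toNat).foldl
          (fun d p2 => step d (ip.2, p2)) d) d ip := by
      intro d ip hip
      have h0 : 0 ≤ ip.1 := pvEnumerate_fst_nonneg t 0 ip hip
      simp only []
      rw [show (ip.1 + 1 + 1).toNat = (ip.1 + 1).toNat + 1 by omega, List.drop_succ_cons]
    rw [PySem.List.foldl_congr_mem _ _ _ _ hcong, ih]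
    simp only [pvPairs, List.foldl_append, List.foldl_map]
    norm_num

theorem pvNested_dict (xs : List Int) :
    (PySem.List.enumerate xs).foldl
      (fun (d : PySem.Dict Int Int) (ip : Int × Int) =>
        (xs.drop (ip.1 + 1).toNat).foldl
          (fun d p2 => d.insert (PySem.Int.mod (p2 - ip.2) 12)
            (d.getD (PySem.Int.mod (p2 - ip.2) 12) 0 + 1)) d)
      PySem.Dict.empty
    = (pvPairs xs).foldl
        (fun (d : PySem.Dict Int Int) pr => d.insert (PySem.Int.mod (pr.2 - pr.1) 12)
          (d.getD (PySem.Int.mod (pr.2 - pr.1) 12) 0 + 1))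
        PySem.Dict.empty :=
  pvNested_eq xs (fun (d : PySem.Dict Int Int) (pr : Int × Int) => d.insert (PySem.Int.mod (pr.2 - pr.1) 12)
    (d.getD (PySem.Int.mod (pr.2 - pr.1) 12) 0 + 1)) (PySem.Dict.empty : PySem.Dict Int Int)

theorem pvCounts_eq (pitches : List Int) :
    (PySem.List.enumerate pitches).foldl
      (fun (d : PySem.Dict Int Int) ip =>
        (PySem.List.slice pitches (some (ip.1 + 1)) none).foldl
          (fun d p2 => d.insert (PySem.Int.mod (p2 - ip.2) 12)
            (d.getD (PySem.Int.mod (p2 - ip.2) 12) 0 + 1)) d)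
      PySem.Dict.empty
    = PySem.Dict.counter ((pvPairs pitches).map (fun pr => PySem.Int.mod (pr.2 - pr.1) 12)) := by
  have h1 : ∀ (d : PySem.Dict Int Int), ∀ ip ∈ PySem.List.enumerate pitches,
      (fun (d : PySem.Dict Int Int) (ip : Int × Int) =>
        (PySem.List.slice pitches (some (ip.1 + 1)) none).foldl
          (fun d p2 => d.insert (PySem.Int.mod (p2 - ip.2) 12)
            (d.getD (PySem.Int.mod (p2 - ip.2) 12) 0 + 1)) d) d ip
      = (fun (d : PySem.Dict Int Int) (ip : Int × Int) =>
        (pitches.drop (ip.1 + 1).toNat).foldl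
          (fun d p2 => d.insert (PySem.Int.mod (p2 - ip.2) 12)
            (d.getD (PySem.Int.mod (p2 - ip.2) 12) 0 + 1)) d) d ip := by
    intro d ip hip
    have h0 : 0 ≤ ip.1 := pvEnumerate_fst_nonneg pitches 0 ip hip
    show (PySem.List.slice pitches (some (ip.1 + 1)) none).foldl
        (fun d p2 => d.insert (PySem.Int.mod (p2 - ip.2) 12)
          (d.getD (PySem.Int.mod (p2 - ip.2) 12) 0 + 1)) d
      = (pitches.drop (ip.1 + 1).toNat).foldl
          (fun d p2 => d.insert (PySem.Int.mod (p2 - ip.2) 12)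
            (d.getD (PySem.Int.mod (p2 - ip.2) 12) 0 + 1)) d
    rw [PySem.List.slice_from _ (by omega : (0:Int) ≤ ip.1 + 1)]
  rw [PySem.List.foldl_congr_mem _ _ _ _ h1, pvNested_dict]
  rw [← PySem.Dict.foldl_insert_getD_add_one_eq_counter, List.foldl_map]

theorem pvCount_flatMap (L : List Int) (hL : L.Nodup) (n : Int → Nat) (k : Int) :
    (L.flatMap (fun v => List.replicate (n v) v)).count k = if k ∈ L then n k else 0 := by
  induction L with
  | nil => simp
  | cons v L' ih =>
    rw [List.nodup_cons] at hL
    rw [List.flatMap_cons, List.count_append, ih hL.2, List.count_replicate]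
    by_cases hk : k = v
    · subst hk
      simp [hL.1]
    · simp [hk, List.mem_cons]
      exact fun h => absurd h.symm hk

theorem pvPerm_out (R : List Int) (hR : ∀ r ∈ R, 0 ≤ r ∧ r < 12) :
    (([1,2,3,4,5,6,7,8,9,10,11] : List Int).flatMap (fun v => List.replicate (R.count v) v)
      ++ List.replicate (R.count 0) 12).Perm
    (R.map (fun v => if v == 0 then (12:Int) else v)) := by
  rw [List.perm_iff_count]
  intro k
  rw [List.count_append, pvCount_flatMap _ (by decide), List.count_replicate,
    List.count_eq_countP (l := R.map (fun v => if v == 0 then (12:Int) else v)), List.countP_map]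
  by_cases hk : k = 12
  · subst hk
    rw [if_neg (by decide), if_pos (by decide), zero_add, List.count_eq_countP]
    refine List.countP_congr ?_
    intro x hx
    rcases hR x hx with ⟨h0, h1⟩
    by_cases hx0 : x = 0
    · subst hx0; simp
    · simp [hx0, Function.comp]
      omega
  · rw [show (if ((12:Int) == k) = true then R.count 0 else 0) = 0 from if_neg (by simp; omega), add_zero]
    by_cases hmem : k ∈ ([1,2,3,4,5,6,7,8,9,10,11] : List Int)
    · rw [if_pos hmem, List.count_eq_countP]
      refine List.countP_congr ?_
      intro x hx
      rcases hR x hx with ⟨h0, h1⟩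
      by_cases hx0 : x = 0
      · subst hx0
        simp only [Function.comp]
        simp at hmem ⊢
        omega
      · simp [hx0, Function.comp]
    · rw [if_neg hmem]
      symm
      rw [List.countP_eq_zero]
      intro x hx
      rcases hR x hx with ⟨h0, h1⟩
      by_cases hx0 : x = 0
      · subst hx0; simp [Function.comp]
        omega
      · simp [hx0, Function.comp]
        intro h; subst h
        exact hmem (by simp at hmem ⊢; omega)

theorem pvPairwise_out (L : List Int) (hL : L.Pairwise (· ≤ ·)) (h12 : ∀ v ∈ L, v ≤ 12)
    (n : Int → Nat) (m : Nat) :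
    ((L.flatMap (fun v => List.replicate (n v) v)) ++ List.replicate m 12).Pairwise (· ≤ ·) := by
  induction L with
  | nil =>
    simp only [List.flatMap_nil, List.nil_append]
    exact List.pairwise_replicate.mpr (Or.inr le_rfl)
  | cons v L' ih =>
    rw [List.pairwise_cons] at hL
    rw [List.flatMap_cons, List.append_assoc]
    rw [List.pairwise_append]
    refine ⟨List.pairwise_replicate.mpr (Or.inr le_rfl), ih hL.2 (fun u hu => h12 u (List.mem_cons_of_mem _ hu)), ?_⟩
    intro x hx y hy
    have hxv : x = v := (List.eq_of_mem_replicate hx)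
    subst hxv
    rcases List.mem_append.mp hy with h | h
    · rcases List.mem_flatMap.mp h with ⟨u, hu, hyu⟩
      rw [List.eq_of_mem_replicate hyu]
      exact hL.1 u hu
    · rw [List.eq_of_mem_replicate h]
      exact h12 _ (List.mem_cons_self)


set_option maxHeartbeats 1000000 in
theorem pvMain (pitches : List Int) :
    get_octave_intervals pitches = get_octave_intervals_alt pitches := by
  have hR : ∀ r ∈ (pvPairs pitches).map (fun pr => PySem.Int.mod (pr.2 - pr.1) 12),
      0 ≤ r ∧ r < 12 := by
    intro r hr
    rcases List.mem_map.mp hr with ⟨pr, _, rfl⟩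
    exact ⟨PySem.Int.mod_nonneg _ (by norm_num), PySem.Int.mod_lt _ (by norm_num)⟩
  have hfuse : (((pvPairs pitches).map (fun pr => pr.2 - pr.1)).map
        (fun ivl => PySem.Int.mod ivl 12))
      = (pvPairs pitches).map (fun pr => PySem.Int.mod (pr.2 - pr.1) 12) := by
    rw [List.map_map]
    rfl
  simp only [get_octave_intervals, get_octave_intervals_alt]
  rw [pvCombos_eq, hfuse, pvCounts_eq]
  rw [show PySem.List.pyRange 1 12 1 = ([1,2,3,4,5,6,7,8,9,10,11] : List Int) from by decide]
  rw [PySem.List.foldl_append_eq_flatMap, List.nil_append]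
  simp only [PySem.Dict.getD_counter, Int.toNat_natCast]
  exact PySem.List.sorted_id_eq_of_perm_of_pairwise _ _
    (pvPerm_out _ hR)
    (pvPairwise_out _ (by decide) (by decide) _ _)

-- ===== VERDICT (by name: the statement is the Claim_ definition above) =====
theorem get_octave_intervals_spec : Claim_equal_get_octave_intervals := by
  intro pitches _
  exact pvMain pitches
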